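-- pv_equiv track=rewrite | github.com/stancld/rossum-agents | rossum-agent/rossum_agent/tools/subagents/knowledge_base.py | _score_terms
-- ===== SOURCE A (Python) =====
-- def _score_terms(
--     terms: list[str], normalized_slug: str, normalized_title: str, content_lower: str
-- ) -> tuple[int, list[str]]:
--     """Score individual term hits and all-terms bonuses across slug/title/content."""
--     score = 0
--     reasons: list[str] = []
--
--     for hits, weight, reason in [
--         (sum(t in normalized_slug for t in terms), 18, "slug_terms"),
--         (sum(t in normalized_title for t in terms), 14, "title_terms"),
--         (sum(t in content_lower for t in terms), 3, "content_terms"),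
--     ]:
--         if hits:
--             score += hits * weight
--             reasons.append(reason)
--
--     if terms:
--         for text, bonus, reason in [
--             (normalized_slug, 40, "all_terms_in_slug"),
--             (normalized_title, 30, "all_terms_in_title"),
--             (content_lower, 10, "all_terms_in_content"),
--         ]:
--             if all(t in text for t in terms):
--                 score += bonus
--                 reasons.append(reason)
--
--     return score, reasons
-- ===== SOURCE B (Python) =====
-- def _score_terms(
--     terms: list[str], normalized_slug: str, normalized_title: str, content_lower: str
-- ) -> tuple[int, list[str]]:
--     """Score individual term hits and all-terms bonuses across slug/title/content."""
--     texts = (normalized_slug, normalized_title, content_lower)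
--     # one bitmask per term: bit i set iff the term occurs in texts[i]
--     masks = [sum(1 << i for i, text in enumerate(texts) if t in text) for t in terms]
--
--     score = 0
--     reasons: list[str] = []
--     for i, (weight, reason) in enumerate(
--         [(18, "slug_terms"), (14, "title_terms"), (3, "content_terms")]
--     ):
--         hits = sum((m >> i) & 1 for m in masks)
--         if hits:
--             score += hits * weight
--             reasons.append(reason)
--
--     if masks:
--         common = masks[0]
--         for m in masks[1:]:
--             common &= m
--         for i, (bonus, reason) in enumerate(
--             [(40, "all_terms_in_slug"), (30, "all_terms_in_title"), (10, "all_terms_in_content")]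
--         ):
--             if (common >> i) & 1:
--                 score += bonus
--                 reasons.append(reason)
--
--     return score, reasons
-- ===== Notes on version B (the rewrite author's own statement) =====
-- stated objective: alternative
-- what changed: B changes the data representation: it builds one 3-bit membership mask per term, derives each per-text hit count by summing one bit across the masks, and gets the all-terms bonuses by a bitwise AND-reduce of the masks instead of A's three sum() scans and three all() scans.
import Mathlib
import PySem

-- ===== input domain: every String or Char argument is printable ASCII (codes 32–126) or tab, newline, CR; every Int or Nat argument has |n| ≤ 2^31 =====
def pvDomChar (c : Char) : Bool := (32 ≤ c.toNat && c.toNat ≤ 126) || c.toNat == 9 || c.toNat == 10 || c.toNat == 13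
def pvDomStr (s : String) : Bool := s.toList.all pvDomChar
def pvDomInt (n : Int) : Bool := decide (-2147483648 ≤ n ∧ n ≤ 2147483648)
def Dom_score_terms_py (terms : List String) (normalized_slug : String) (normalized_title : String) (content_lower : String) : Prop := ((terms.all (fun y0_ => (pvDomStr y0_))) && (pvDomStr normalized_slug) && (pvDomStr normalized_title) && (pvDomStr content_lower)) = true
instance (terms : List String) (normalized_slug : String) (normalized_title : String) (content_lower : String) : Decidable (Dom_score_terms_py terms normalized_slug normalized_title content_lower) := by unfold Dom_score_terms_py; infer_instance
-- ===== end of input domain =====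

-- ===== PORT A =====
-- B builds one per-term bitmask (bit i = term in text i) and derives bonuses via a bitwise AND-reduce (objective: alternative).
def score_terms_py (terms : List String) (normalized_slug : String) (normalized_title : String) (content_lower : String) : Int × List String :=
  -- for hits, weight, reason in [(sum(...),18,"slug_terms"), ...]: if hits: score += hits*weight; reasons.append(reason)
  let acc1 : Int × List String :=
    [((terms.map (fun t => if PySem.Str.isIn t normalized_slug then (1 : Int) else 0)).sum, (18 : Int), "slug_terms"),
     ((terms.map (fun t => if PySem.Str.isIn t normalized_title then (1 : Int) else 0)).sum, (14 : Int), "title_terms"),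
     ((terms.map (fun t => if PySem.Str.isIn t content_lower then (1 : Int) else 0)).sum, (3 : Int), "content_terms")].foldl
      (fun acc x => if x.1 ≠ 0 then (acc.1 + x.1 * x.2.1, acc.2 ++ [x.2.2]) else acc) ((0 : Int), ([] : List String))
  -- if terms: for text, bonus, reason in [...]: if all(t in text for t in terms): score += bonus; reasons.append(reason)
  if terms ≠ [] then
    [(normalized_slug, (40 : Int), "all_terms_in_slug"),
     (normalized_title, (30 : Int), "all_terms_in_title"),
     (content_lower, (10 : Int), "all_terms_in_content")].foldl
      (fun acc x => if terms.all (fun t => PySem.Str.isIn t x.1) then (acc.1 + x.2.1, acc.2 ++ [x.2.2]) else acc) acc1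
  else acc1

-- ===== PORT B =====
def score_terms_py_alt (terms : List String) (normalized_slug : String) (normalized_title : String) (content_lower : String) : Int × List String :=
  -- masks = [sum(1 << i for i, text in enumerate(texts) if t in text) for t in terms]
  let masks : List Nat := terms.map (fun t =>
    (if PySem.Str.isIn t normalized_slug then (1 : Nat) else 0) +
    (if PySem.Str.isIn t normalized_title then (2 : Nat) else 0) +
    (if PySem.Str.isIn t content_lower then (4 : Nat) else 0))
  -- for i, (weight, reason) in enumerate([...]): hits = sum((m >> i) & 1 for m in masks); if hits: ...
  let st1 : Int × List String :=
    [((0 : Nat), (18 : Int), "slug_terms"), (1, 14, "title_terms"), (2, 3, "content_terms")].foldl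
      (fun acc x =>
        let hits : Nat := (masks.map (fun m => (m >>> x.1) &&& 1)).sum
        if hits ≠ 0 then (acc.1 + (hits : Int) * x.2.1, acc.2 ++ [x.2.2]) else acc)
      ((0 : Int), ([] : List String))
  -- if masks: common = AND-reduce of masks; bonuses by testing bits of common
  match masks with
  | [] => st1
  | m0 :: rest =>
    let common : Nat := rest.foldl (fun a m => a &&& m) m0
    [((0 : Nat), (40 : Int), "all_terms_in_slug"), (1, 30, "all_terms_in_title"), (2, 10, "all_terms_in_content")].foldl
      (fun acc x => if (common >>> x.1) &&& 1 ≠ 0 then (acc.1 + x.2.1, acc.2 ++ [x.2.2]) else acc) st1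

-- ===== PRECONDITION & SPEC =====
def Spec_score_terms_py (terms : List String) (normalized_slug : String) (normalized_title : String) (content_lower : String) (out : Int × List String) : Prop := out = score_terms_py_alt terms normalized_slug normalized_title content_lower
instance (terms : List String) (normalized_slug : String) (normalized_title : String) (content_lower : String) (out : Int × List String) : Decidable (Spec_score_terms_py terms normalized_slug normalized_title content_lower out) := by unfold Spec_score_terms_py; infer_instance

-- ===== CLAIM (what is proved, stated in full; the proofs are below) =====
def Claim_equal_score_terms_py : Prop := ∀ (terms : List String) (normalized_slug : String) (normalized_title : String) (content_lower : String), Dom_score_terms_py terms normalized_slug normalized_title content_lower → Spec_score_terms_py terms normalized_slug normalized_title content_lower (score_terms_py terms normalized_slug normalized_title content_lower)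

-- ===== LEMMAS AND PROOFS =====
-- the per-term mask B builds
def pvEnc (s t c : String) (x : String) : Nat :=
  (if PySem.Str.isIn x s then (1 : Nat) else 0) +
  (if PySem.Str.isIn x t then (2 : Nat) else 0) +
  (if PySem.Str.isIn x c then (4 : Nat) else 0)

theorem pvEnc_bit0 (s t c x : String) :
    (pvEnc s t c x >>> 0) &&& 1 = (if PySem.Str.isIn x s then (1 : Nat) else 0) := by
  unfold pvEnc; split_ifs <;> decide
theorem pvEnc_bit1 (s t c x : String) :
    (pvEnc s t c x >>> 1) &&& 1 = (if PySem.Str.isIn x t then (1 : Nat) else 0) := by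
  unfold pvEnc; split_ifs <;> decide
theorem pvEnc_bit2 (s t c x : String) :
    (pvEnc s t c x >>> 2) &&& 1 = (if PySem.Str.isIn x c then (1 : Nat) else 0) := by
  unfold pvEnc; split_ifs <;> decide

-- Nat count of terms hitting a text, and its relation to A's Int indicator sum
def pvCntN (terms : List String) (text : String) : Nat :=
  (terms.map (fun x => if PySem.Str.isIn x text then (1 : Nat) else 0)).sum

theorem pvIntSum_eq (terms : List String) (text : String) :
    (terms.map (fun x => if PySem.Str.isIn x text then (1 : Int) else 0)).sum
      = (pvCntN terms text : Int) := by
  induction terms with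
  | nil => simp [pvCntN]
  | cons y ys ih => simp only [pvCntN, List.map_cons, List.sum_cons] at *; rw [ih]; split <;> push_cast <;> ring

-- B's bit-i hit sum equals pvCntN
theorem pvHits_eq (terms : List String) (s t c : String) (i : Nat) (text : String)
    (h : ∀ x, (pvEnc s t c x >>> i) &&& 1 = (if PySem.Str.isIn x text then (1 : Nat) else 0)) :
    ((terms.map (pvEnc s t c)).map (fun m => (m >>> i) &&& 1)).sum = pvCntN terms text := by
  induction terms with
  | nil => simp [pvCntN]
  | cons y ys ih => simp only [pvCntN, List.map_cons, List.sum_cons] at *; rw [h y, ih]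

-- testBit of an AND-fold = all bits set
theorem pvLand_bit (rest : List Nat) (m0 : Nat) (i : Nat) :
    (rest.foldl (fun a m => a &&& m) m0).testBit i
      = (m0.testBit i && rest.all (fun m => m.testBit i)) := by
  induction rest generalizing m0 with
  | nil => simp
  | cons r rs ih => simp [List.foldl_cons, ih, Bool.and_assoc]

theorem pvShift_ne_iff (m i : Nat) : ((m >>> i) &&& 1 ≠ 0) ↔ m.testBit i = true := by
  simp [Nat.testBit, Nat.and_one_is_mod, Nat.shiftRight_eq_div_pow, Nat.one_and_eq_mod_two]

theorem pvEnc_testBit (s t c x : String) (i : Nat) (text : String)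
    (h : (pvEnc s t c x >>> i) &&& 1 = (if PySem.Str.isIn x text then (1 : Nat) else 0)) :
    (pvEnc s t c x).testBit i = PySem.Str.isIn x text := by
  have hiff := pvShift_ne_iff (pvEnc s t c x) i
  rw [h] at hiff
  cases hb : (pvEnc s t c x).testBit i <;> cases hi : PySem.Str.isIn x text <;> simp_all

-- all-bit of the AND-reduce over (x :: xs).map enc ↔ all terms in text
theorem pvCommon_bit (x : String) (xs : List String) (s t c : String) (i : Nat) (text : String)
    (h : ∀ y, (pvEnc s t c y >>> i) &&& 1 = (if PySem.Str.isIn y text then (1 : Nat) else 0)) :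
    (((xs.map (pvEnc s t c)).foldl (fun a m => a &&& m) (pvEnc s t c x)) >>> i) &&& 1 ≠ 0
      ↔ ((x :: xs).all (fun y => PySem.Str.isIn y text)) = true := by
  rw [pvShift_ne_iff, pvLand_bit]
  simp only [List.all_cons, List.all_map, Bool.and_eq_true]
  rw [pvEnc_testBit s t c x i text (h x)]
  constructor
  · rintro ⟨h1, h2⟩
    exact ⟨h1, by simpa [Function.comp, List.all_eq_true, pvEnc_testBit s t c _ i text (h _)] using h2⟩
  · rintro ⟨h1, h2⟩
    refine ⟨h1, ?_⟩
    simp only [List.all_eq_true, Function.comp] at h2 ⊢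
    intro y hy; rw [pvEnc_testBit s t c y i text (h y)]; exact h2 y hy

-- ===== VERDICT (by name: the statement is the Claim_ definition above) =====
set_option maxHeartbeats 1000000 in
theorem score_terms_py_spec : Claim_equal_score_terms_py := by
  intro terms slug title content _
  unfold Spec_score_terms_py score_terms_py score_terms_py_alt
  simp only [List.foldl_cons, List.foldl_nil]
  rw [show (fun t => (if PySem.Str.isIn t slug then (1:Nat) else 0) + (if PySem.Str.isIn t title then (2:Nat) else 0) + (if PySem.Str.isIn t content then (4:Nat) else 0)) = pvEnc slug title content from rfl]
  rw [pvHits_eq terms slug title content 0 slug (fun x => pvEnc_bit0 slug title content x),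
      pvHits_eq terms slug title content 1 title (fun x => pvEnc_bit1 slug title content x),
      pvHits_eq terms slug title content 2 content (fun x => pvEnc_bit2 slug title content x),
      pvIntSum_eq terms slug, pvIntSum_eq terms title, pvIntSum_eq terms content]
  cases terms with
  | nil => simp [pvCntN]
  | cons x xs =>
    have h0 := pvCommon_bit x xs slug title content 0 slug (fun y => pvEnc_bit0 slug title content y)
    have h1 := pvCommon_bit x xs slug title content 1 title (fun y => pvEnc_bit1 slug title content y)
    have h2 := pvCommon_bit x xs slug title content 2 content (fun y => pvEnc_bit2 slug title content y)
    simp only [List.map_cons, ne_eq, reduceCtorEq, not_false_eq_true, if_true,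
      Int.natCast_eq_zero] at h0 h1 h2 ⊢
    simp only [h0, h1, h2]
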